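-- pv_equiv track=rewrite | github.com/PrabhudevGun2/ai-research-ppt | backend/agents/slide_synthesis.py | _find_best_slide_for_asset
-- ===== SOURCE A (Python) =====
-- def _find_best_slide_for_asset(slides, asset_type, asset):
--     """Find the best existing slide to attach an asset to."""
--     # For figures: prefer methodology/architecture slides without images
--     # For tables: prefer results/analysis slides without images
--     if asset_type == "figure":
--         preferred = {"methodology", "architecture", "method", "contribution"}
--     else:
--         preferred = {"results", "analysis", "experiments", "evaluation"}
--
--     # First pass: preferred type without image
--     for s in slides:
--         if s.get("slide_type") in preferred and not s.get("image_path"):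
--             return s
--     # Second pass: any slide without image (skip title/conclusion)
--     for s in slides:
--         if s.get("slide_type") not in {"title", "conclusion"} and not s.get("image_path"):
--             return s
--     return None
-- ===== SOURCE B (Python) =====
-- def _find_best_slide_for_asset(slides, asset_type, asset):
--     """Find the best existing slide to attach an asset to (single pass)."""
--     if asset_type == "figure":
--         preferred = {"methodology", "architecture", "method", "contribution"}
--     else:
--         preferred = {"results", "analysis", "experiments", "evaluation"}
--     fallback = None
--     for s in slides:
--         if s.get("image_path"):
--             continue
--         if s.get("slide_type") in preferred:
--             return s
--         if fallback is None and s.get("slide_type") not in {"title", "conclusion"}: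
--             fallback = s
--     return fallback
-- ===== Notes on version B (the rewrite author's own statement) =====
-- stated objective: simpler
-- what changed: Replaces A's two sequential scans over the slide list by a single pass that returns a preferred slide eagerly and remembers the first generic image-free slide in a fallback variable.
import Mathlib
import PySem

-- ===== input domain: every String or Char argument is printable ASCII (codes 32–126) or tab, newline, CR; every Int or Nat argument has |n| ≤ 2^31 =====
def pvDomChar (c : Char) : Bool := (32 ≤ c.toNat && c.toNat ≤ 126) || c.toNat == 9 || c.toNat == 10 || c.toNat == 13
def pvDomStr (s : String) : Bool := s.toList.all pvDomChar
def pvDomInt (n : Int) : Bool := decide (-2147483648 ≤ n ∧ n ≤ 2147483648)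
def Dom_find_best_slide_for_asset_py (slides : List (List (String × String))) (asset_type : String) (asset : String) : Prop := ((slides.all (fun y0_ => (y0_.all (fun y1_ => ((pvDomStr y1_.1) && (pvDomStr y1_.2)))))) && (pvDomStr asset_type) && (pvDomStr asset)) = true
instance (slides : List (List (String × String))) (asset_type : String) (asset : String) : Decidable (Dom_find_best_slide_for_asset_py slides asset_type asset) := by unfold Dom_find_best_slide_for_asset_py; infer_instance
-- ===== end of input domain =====

-- B replaces A's two sequential scans by one pass with a remembered fallback slide (objective: simpler).

-- shared accessors: s.get(k) on the slide dict, Python truthiness of the optional string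
def pvSlideGet (s : List (String × String)) (k : String) : Option String :=
  (PySem.Dict.ofList s).get? k

-- 'not s.get("image_path")' : missing key or empty string
def pvNoImage (s : List (String × String)) : Bool :=
  match pvSlideGet s "image_path" with
  | none => true
  | some v => v == ""

-- 's.get("slide_type") in preferred' (None is never in a set of strings)
def pvTypeIn (s : List (String × String)) (tys : List String) : Bool :=
  match pvSlideGet s "slide_type" with
  | none => false
  | some t => tys.contains t

-- ===== PORT A =====
def find_best_slide_for_asset_py (slides : List (List (String × String))) (asset_type : String) (asset : String) : Option (List (String × String)) :=
  let preferred : List String :=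
    if asset_type == "figure" then
      PySem.Set.ofList ["methodology", "architecture", "method", "contribution"]
    else
      PySem.Set.ofList ["results", "analysis", "experiments", "evaluation"]
  -- first pass: preferred type without image
  match slides.find? (fun s => pvTypeIn s preferred && pvNoImage s) with
  | some s => some s
  | none =>
    -- second pass: any slide without image (skip title/conclusion)
    slides.find? (fun s => !(pvTypeIn s (PySem.Set.ofList ["title", "conclusion"])) && pvNoImage s)

-- ===== PORT B =====
def find_best_slide_for_asset_py_alt_go (preferred : List String) (slides : List (List (String × String))) (fallback : Option (List (String × String))) : Option (List (String × String)) :=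
  match slides with
  | [] => fallback
  | s :: rest =>
    if !(pvNoImage s) then
      find_best_slide_for_asset_py_alt_go preferred rest fallback
    else if pvTypeIn s preferred then
      some s
    else if fallback == none && !(pvTypeIn s (PySem.Set.ofList ["title", "conclusion"])) then
      find_best_slide_for_asset_py_alt_go preferred rest (some s)
    else
      find_best_slide_for_asset_py_alt_go preferred rest fallback

def find_best_slide_for_asset_py_alt (slides : List (List (String × String))) (asset_type : String) (asset : String) : Option (List (String × String)) :=
  let preferred : List String :=
    if asset_type == "figure" then
      PySem.Set.ofList ["methodology", "architecture", "method", "contribution"]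
    else
      PySem.Set.ofList ["results", "analysis", "experiments", "evaluation"]
  find_best_slide_for_asset_py_alt_go preferred slides none

-- ===== PRECONDITION & SPEC =====
def Spec_find_best_slide_for_asset_py (slides : List (List (String × String))) (asset_type : String) (asset : String) (out : Option (List (String × String))) : Prop := out = find_best_slide_for_asset_py_alt slides asset_type asset
instance (slides : List (List (String × String))) (asset_type : String) (asset : String) (out : Option (List (String × String))) : Decidable (Spec_find_best_slide_for_asset_py slides asset_type asset out) := by unfold Spec_find_best_slide_for_asset_py; infer_instance

-- ===== CLAIM (what is proved, stated in full; the proofs are below) =====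
def Claim_equal_find_best_slide_for_asset_py : Prop := ∀ (slides : List (List (String × String))) (asset_type : String) (asset : String), Dom_find_best_slide_for_asset_py slides asset_type asset → Spec_find_best_slide_for_asset_py slides asset_type asset (find_best_slide_for_asset_py slides asset_type asset)

-- ===== LEMMAS AND PROOFS =====

-- loop invariant of B's single pass: it yields the first preferred image-free
-- slide, else the remembered fallback, else the first generic image-free slide
theorem alt_go_eq (preferred : List String) (slides : List (List (String × String))) (fb : Option (List (String × String))) :
    find_best_slide_for_asset_py_alt_go preferred slides fb =
      ((slides.find? (fun s => pvTypeIn s preferred && pvNoImage s)).or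
        (fb.or (slides.find? (fun s => !(pvTypeIn s (PySem.Set.ofList ["title", "conclusion"])) && pvNoImage s)))) := by
  induction slides generalizing fb with
  | nil => simp [find_best_slide_for_asset_py_alt_go]
  | cons s rest ih =>
    rw [find_best_slide_for_asset_py_alt_go]
    by_cases hni : pvNoImage s = true
    · by_cases hp : pvTypeIn s preferred = true
      · simp [hni, hp, List.find?]
      · by_cases htc : pvTypeIn s (PySem.Set.ofList ["title", "conclusion"]) = true
        · simp [hni, hp, htc, List.find?, ih]
        · cases fb with
          | none => simp [hni, hp, htc, List.find?, ih]
          | some v => simp [hni, hp, htc, List.find?, ih]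
    · simp [hni, List.find?, ih]

-- ===== VERDICT (by name: the statement is the Claim_ definition above) =====
theorem find_best_slide_for_asset_py_spec : Claim_equal_find_best_slide_for_asset_py := by
  intro slides asset_type asset _
  unfold Spec_find_best_slide_for_asset_py find_best_slide_for_asset_py find_best_slide_for_asset_py_alt
  rw [alt_go_eq]
  cases h : slides.find? (fun s => pvTypeIn s (if asset_type == "figure" then
      PySem.Set.ofList ["methodology", "architecture", "method", "contribution"]
    else
      PySem.Set.ofList ["results", "analysis", "experiments", "evaluation"]) && pvNoImage s) <;>
    simp only [h] <;> simp [Option.or]
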